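-- pv_equiv track=rewrite | github.com/nstalways/Algorithm-Questions | 00_Etc/BOJ_1780.py | check
-- ===== SOURCE A (Python) =====
-- def check(arr):
--     base = arr[0][0]
--     state = True
--
--     for row in arr:
--         for element in row:
--             if base != element:
--                 state = False
--                 break
--
--         if not state:
--             break
--
--     return state, base
-- ===== SOURCE B (Python) =====
-- def check(arr):
--     base = arr[0][0]
--     state = len({e for row in arr for e in row}) == 1
--     return state, base
-- ===== Notes on version B (the rewrite author's own statement) =====
-- stated objective: idiomatic
-- what changed: Replaces the nested loops with break flags and a running boolean by building the set of all grid elements once and testing uniformity as len(set)==1.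
import Mathlib
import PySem

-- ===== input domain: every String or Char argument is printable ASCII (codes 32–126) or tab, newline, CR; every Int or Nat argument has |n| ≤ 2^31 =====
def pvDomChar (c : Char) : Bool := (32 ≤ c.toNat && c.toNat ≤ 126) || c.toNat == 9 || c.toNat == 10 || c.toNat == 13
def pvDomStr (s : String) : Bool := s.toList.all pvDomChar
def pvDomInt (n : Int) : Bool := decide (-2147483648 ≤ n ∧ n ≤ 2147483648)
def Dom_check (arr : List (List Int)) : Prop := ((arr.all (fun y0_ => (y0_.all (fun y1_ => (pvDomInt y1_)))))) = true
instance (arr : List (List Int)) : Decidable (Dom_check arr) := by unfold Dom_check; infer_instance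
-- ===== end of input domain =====

-- B replaces A's nested loops with break flags by one set of all elements and a len==1 test (idiomatic).

-- ===== PORT A =====
-- inner 'for element in row' loop with its break
def checkInner (base : Int) : List Int → Bool
  | [] => true
  | e :: rest => if base ≠ e then false else checkInner base rest

-- outer 'for row in arr' loop with its break
def checkOuter (base : Int) : List (List Int) → Bool
  | [] => true
  | row :: rest => if !(checkInner base row) then false else checkOuter base rest

def check (arr : List (List Int)) : Bool × Int :=
  match (PySem.List.pyGet? arr 0).bind (fun r => PySem.List.pyGet? r 0) with
  | none => (true, 0)  -- arr[0][0] raises IndexError: outside Pre_check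
  | some base => (checkOuter base arr, base)

-- ===== PORT B =====
def check_alt (arr : List (List Int)) : Bool × Int :=
  match (PySem.List.pyGet? arr 0).bind (fun r => PySem.List.pyGet? r 0) with
  | none => (true, 0)  -- arr[0][0] raises IndexError: outside Pre_check
  | some base =>
    (decide (PySem.Set.len (PySem.Set.ofList (arr.flatMap (fun row => row))) = 1), base)

-- ===== PRECONDITION & SPEC =====
-- Pre_ excludes exactly the inputs where arr[0][0] raises IndexError in both A and B.
def Pre_check (arr : List (List Int)) : Prop := arr.headD [] ≠ []
instance (arr : List (List Int)) : Decidable (Pre_check arr) := by unfold Pre_check; infer_instance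
def pvWitness_check : List (List Int) := [[1, 1], [1]]

def Spec_check (arr : List (List Int)) (out : Bool × Int) : Prop := out = check_alt arr
instance (arr : List (List Int)) (out : Bool × Int) : Decidable (Spec_check arr out) := by unfold Spec_check; infer_instance

-- ===== CLAIM (what is proved, stated in full; the proofs are below) =====
def Claim_equal_check : Prop := ∀ (arr : List (List Int)), Dom_check arr → Pre_check arr → Spec_check arr (check arr)

-- ===== LEMMAS AND PROOFS =====

theorem checkInner_eq_true (base : Int) (row : List Int) :
    checkInner base row = true ↔ ∀ x ∈ row, x = base := by
  induction row with
  | nil => simp [checkInner]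
  | cons e rest ih =>
    simp only [checkInner]
    by_cases h : base = e
    · subst h
      simp [ih]
    · simp only [h, ne_eq, not_false_eq_true, if_pos, List.mem_cons]
      constructor
      · intro hfalse; cases hfalse
      · intro hall; exact absurd (hall e (Or.inl rfl)).symm h

theorem checkOuter_eq_true (base : Int) (rows : List (List Int)) :
    checkOuter base rows = true ↔ ∀ r ∈ rows, ∀ x ∈ r, x = base := by
  induction rows with
  | nil => simp [checkOuter]
  | cons row rest ih =>
    simp only [checkOuter]
    cases h : checkInner base row with
    | true =>
      have hrow := (checkInner_eq_true base row).mp h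
      rw [Bool.not_true, if_neg (by decide : ¬ (false = true))]
      rw [ih]
      constructor
      · intro hrest r hr
        rcases List.mem_cons.mp hr with h' | h'
        · subst h'; exact hrow
        · exact hrest r h'
      · intro hall r hr; exact hall r (List.mem_cons_of_mem _ hr)
    | false =>
      rw [Bool.not_false, if_pos rfl]
      constructor
      · intro hf; cases hf
      · intro hall
        have := (checkInner_eq_true base row).mpr (hall row List.mem_cons_self)
        rw [this] at h; cases h

theorem ofList_all_eq (b : Int) (t : List Int) (h : ∀ x ∈ t, x = b) :
    PySem.Set.ofList (b :: t) = [b] := by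
  have h0 : PySem.Set.ofList (b :: t) = t.foldl PySem.Set.add [b] := by
    simp [PySem.Set.ofList_eq_foldl, List.foldl_cons, PySem.Set.add, PySem.Set.contains]
  rw [h0]
  induction t with
  | nil => rfl
  | cons x t' ih =>
    have hx : x = b := h x (by simp)
    have : PySem.Set.add [b] x = [b] := by
      simp [PySem.Set.add, PySem.Set.contains, hx]
    simp only [List.foldl_cons, this]
    exact ih (fun y hy => h y (List.mem_cons_of_mem _ hy)) rfl

theorem ofList_len_one (l : List Int) (h : (PySem.Set.ofList l).length = 1) :
    ∀ x ∈ l, ∀ y ∈ l, x = y := by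
  obtain ⟨a, ha⟩ := List.length_eq_one_iff.mp h
  intro x hx y hy
  have hx' : x ∈ PySem.Set.ofList l := (PySem.Set.mem_ofList l x).mpr hx
  have hy' : y ∈ PySem.Set.ofList l := (PySem.Set.mem_ofList l y).mpr hy
  rw [ha] at hx' hy'
  simp at hx' hy'; omega

-- ===== VERDICT (by name: the statement is the Claim_ definition above) =====
theorem check_spec : Claim_equal_check := by
  intro arr _ hpre
  unfold Spec_check check check_alt
  match harr : arr with
  | [] => simp [Pre_check] at hpre
  | [] :: rest => simp [Pre_check] at hpre
  | (b :: t) :: rest =>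
    have hget : ((PySem.List.pyGet? ((b :: t) :: rest) 0).bind
        (fun r => PySem.List.pyGet? r 0)) = some b := by
      simp [PySem.List.pyGet?, PySem.List.pyIdx?]
    rw [hget]
    refine Prod.ext ?_ rfl
    simp only
    have hflat : ((b :: t) :: rest).flatMap (fun row => row) = b :: (t ++ rest.flatMap (fun row => row)) := by
      simp
    by_cases hall : ∀ r ∈ (b :: t) :: rest, ∀ x ∈ r, x = b
    · have h1 : checkOuter b ((b :: t) :: rest) = true := (checkOuter_eq_true _ _).mpr hall
      have h2 : ∀ x ∈ t ++ rest.flatMap (fun row => row), x = b := by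
        intro x hx
        rcases List.mem_append.mp hx with h | h
        · exact hall (b :: t) (List.mem_cons_self) x (List.mem_cons_of_mem _ h)
        · obtain ⟨r, hr, hxr⟩ := List.mem_flatMap.mp h
          exact hall r (by simp [hr]) x hxr
      rw [h1, hflat, PySem.Set.len, ofList_all_eq b _ h2]
      simp
    · have h1 : checkOuter b ((b :: t) :: rest) = false := by
        cases hco : checkOuter b ((b :: t) :: rest)
        · rfl
        · exact absurd ((checkOuter_eq_true _ _).mp hco) hall
      rw [h1]
      rw [hflat, PySem.Set.len]
      by_contra hcon
      rw [eq_comm, Bool.not_eq_false, decide_eq_true_iff] at hcon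
      have hlen : (PySem.Set.ofList (b :: (t ++ rest.flatMap (fun row => row)))).length = 1 := by
        exact_mod_cast hcon
      have huni := ofList_len_one _ hlen
      apply hall
      intro r hr x hxr
      apply huni x _ b (by simp)
      rw [hflat] at *
      rcases List.mem_cons.mp hr with h | h
      · subst h; rcases List.mem_cons.mp hxr with h' | h' <;> simp [h']
      · exact List.mem_cons_of_mem _ (List.mem_append.mpr (Or.inr (List.mem_flatMap.mpr ⟨r, h, hxr⟩)))
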